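-- pv_equiv track=rewrite | github.com/AlexielArdilla/lenguaje-gipsy | gipsy_transpiler_v0.3.py | remove_multiline_comments
-- ===== SOURCE A (Python) =====
-- def remove_multiline_comments(lines):
--     new_lines = []
--     inside_comment = False
--     for line in lines:
--         if '###' in line:
--             count = line.count('###')
--             if count == 2:
--                 continue
--             inside_comment = not inside_comment
--             continue
--         if not inside_comment:
--             new_lines.append(line)
--     return new_lines
-- ===== SOURCE B (Python) =====
-- def remove_multiline_comments(lines):
--     # Phase 1: per-line toggle flags; Phase 2: prefix parity; Phase 3: filter.
--     toggles = [('###' in line) and line.count('###') != 2 for line in lines]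
--     parities = []
--     p = False
--     for t in toggles:
--         parities.append(p)
--         p ^= t
--     return [line for line, q in zip(lines, parities)
--             if '###' not in line and not q]
-- ===== Notes on version B (the rewrite author's own statement) =====
-- stated objective: alternative
-- what changed: Replaces the single-pass mutable inside_comment state machine with a three-phase pipeline: precomputed per-line toggle flags, a prefix-parity list, and a pure zip+filter comprehension selecting lines with no '###' and even toggle parity.
import Mathlib
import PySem

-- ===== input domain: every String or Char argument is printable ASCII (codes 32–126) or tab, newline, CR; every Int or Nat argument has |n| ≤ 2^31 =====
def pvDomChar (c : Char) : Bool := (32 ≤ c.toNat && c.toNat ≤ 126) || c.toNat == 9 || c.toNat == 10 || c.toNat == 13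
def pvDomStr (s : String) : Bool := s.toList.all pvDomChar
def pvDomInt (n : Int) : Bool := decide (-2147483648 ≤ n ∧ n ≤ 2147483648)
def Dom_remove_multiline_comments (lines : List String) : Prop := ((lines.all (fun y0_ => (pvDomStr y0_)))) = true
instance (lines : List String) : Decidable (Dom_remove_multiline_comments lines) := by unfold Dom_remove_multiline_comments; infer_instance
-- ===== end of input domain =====

-- B replaces A's mutable inside_comment state machine with precomputed toggle
-- flags, a prefix-parity list and a pure zip+filter (objective: alternative).

-- ===== PORT A =====
def pvStepA (st : List String × Bool) (line : String) : List String × Bool :=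
  if PySem.Str.isIn "###" line then
    if PySem.Str.count line "###" = 2 then st
    else (st.1, !st.2)
  else if st.2 = false then (st.1 ++ [line], st.2) else st

def remove_multiline_comments (lines : List String) : List String :=
  (lines.foldl pvStepA ([], false)).1

-- ===== PORT B =====
def pvParStep (st : List Bool × Bool) (t : Bool) : List Bool × Bool :=
  (st.1 ++ [st.2], xor st.2 t)

def remove_multiline_comments_alt (lines : List String) : List String :=
  let toggles := lines.map (fun line =>
    PySem.Str.isIn "###" line && !(PySem.Str.count line "###" == 2))
  let parities := (toggles.foldl pvParStep ([], false)).1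
  ((lines.zip parities).filter
    (fun lq => !PySem.Str.isIn "###" lq.1 && !lq.2)).map Prod.fst

-- ===== PRECONDITION & SPEC =====
def Spec_remove_multiline_comments (lines : List String) (out : List String) : Prop := out = remove_multiline_comments_alt lines
instance (lines : List String) (out : List String) : Decidable (Spec_remove_multiline_comments lines out) := by unfold Spec_remove_multiline_comments; infer_instance

-- ===== CLAIM (what is proved, stated in full; the proofs are below) =====
def Claim_equal_remove_multiline_comments : Prop := ∀ (lines : List String), Dom_remove_multiline_comments lines → Spec_remove_multiline_comments lines (remove_multiline_comments lines)

-- ===== LEMMAS AND PROOFS =====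

/-- The parity list B computes, written as a structural recursion. -/
def pvParList : List Bool → Bool → List Bool
  | [], _ => []
  | t :: ts, b => b :: pvParList ts (xor b t)

theorem pvParFold (ts : List Bool) (acc : List Bool) (b : Bool) :
    (ts.foldl pvParStep (acc, b)).1 = acc ++ pvParList ts b := by
  induction ts generalizing acc b with
  | nil => simp [pvParList]
  | cons t ts ih => simp [pvParStep, pvParList, ih]

/-- Main invariant: A's fold from any state equals the accumulator followed by
    B's zip/filter output with the parity list started at A's flag. -/
theorem pvMain (lines : List String) (acc : List String) (b : Bool) :
    (lines.foldl pvStepA (acc, b)).1 =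
      acc ++ ((lines.zip (pvParList (lines.map (fun line =>
          PySem.Str.isIn "###" line && !(PySem.Str.count line "###" == 2))) b)).filter
        (fun lq => !PySem.Str.isIn "###" lq.1 && !lq.2)).map Prod.fst := by
  induction lines generalizing acc b with
  | nil => simp [pvParList]
  | cons l ls ih =>
    simp only [List.map_cons, pvParList, List.zip_cons_cons, List.foldl_cons, pvStepA,
      List.filter_cons]
    cases hin : PySem.Str.isIn "###" l with
    | false =>
      -- l contains no '###': the toggle is false, the parity is unchanged
      simp only [Bool.false_and, Bool.xor_false, Bool.not_false, Bool.true_and]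
      cases b with
      | false => simp [ih]
      | true => simp [ih]
    | true =>
      -- l contains '###': it is dropped; the parity flips unless count = 2
      simp only [Bool.not_true, Bool.false_and, Bool.false_eq_true, reduceIte, Bool.true_and]
      by_cases hc : PySem.Str.count l "###" = 2
      · have hc2 : (PySem.Str.count l "###" == 2) = true := by rw [hc]; rfl
        rw [if_pos hc, hc2]
        simp [ih]
      · have hc2 : (PySem.Str.count l "###" == 2) = false := by simpa using hc
        rw [if_neg hc, hc2]
        simp [ih]

-- ===== VERDICT (by name: the statement is the Claim_ definition above) =====
theorem remove_multiline_comments_spec : Claim_equal_remove_multiline_comments := by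
  intro lines _
  show remove_multiline_comments lines = remove_multiline_comments_alt lines
  unfold remove_multiline_comments remove_multiline_comments_alt
  rw [pvMain]
  simp [pvParFold]
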